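-- pv_equiv track=rewrite | github.com/bwzkk/qinjian-web | backend/app/services/behavior_judgement.py | _iter_keyword_positions
-- ===== SOURCE A (Python) =====
-- def _iter_keyword_positions(cleaned: str, keyword: str):
--     start = 0
--     while keyword:
--         index = cleaned.find(keyword, start)
--         if index < 0:
--             break
--         yield index
--         start = index + len(keyword)
-- ===== SOURCE B (Python) =====
-- def _iter_keyword_positions(cleaned: str, keyword: str):
--     if not keyword:
--         return
--     m = len(keyword)
--     # pass 1: every occurrence position, overlapping ones included
--     candidates = [i for i in range(len(cleaned) - m + 1) if cleaned[i:i + m] == keyword]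
--     # pass 2: greedy left-to-right selection of non-overlapping occurrences
--     last_end = 0
--     for i in candidates:
--         if i >= last_end:
--             yield i
--             last_end = i + m
-- ===== Notes on version B (the rewrite author's own statement) =====
-- stated objective: alternative
-- what changed: Replaces A's find/advance while-loop by two staged passes: first enumerate every occurrence position (overlaps included) by brute-force slice comparison over all starting indices, then a greedy filter that keeps the non-overlapping ones left to right.
import Mathlib
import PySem

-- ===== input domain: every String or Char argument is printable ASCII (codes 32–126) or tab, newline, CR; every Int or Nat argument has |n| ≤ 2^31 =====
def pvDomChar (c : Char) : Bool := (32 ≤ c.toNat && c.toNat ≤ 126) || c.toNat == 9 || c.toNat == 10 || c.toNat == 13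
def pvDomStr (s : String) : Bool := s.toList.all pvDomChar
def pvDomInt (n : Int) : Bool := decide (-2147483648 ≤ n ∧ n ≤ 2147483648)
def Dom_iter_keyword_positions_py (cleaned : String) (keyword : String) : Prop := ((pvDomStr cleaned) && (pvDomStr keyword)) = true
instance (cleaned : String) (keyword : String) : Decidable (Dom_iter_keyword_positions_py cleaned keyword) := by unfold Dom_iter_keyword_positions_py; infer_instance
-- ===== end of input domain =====

-- B replaces A's find/advance while-loop by two staged passes: enumerate every occurrence
-- position (overlaps included) by slice comparison, then greedily keep the non-overlapping ones.

-- ===== PORT A =====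
-- the while-loop of A; fuel only makes the loop total (cleaned.length + 1 iterations always
-- suffice, since `start` grows by at least 1 per yielded match and stays ≤ len(cleaned))
def iterA_loop (cleaned : String) (keyword : String) (start : Int) : Nat → List Int
  | 0 => []
  | fuel + 1 =>
    if keyword.toList = [] then []                                -- while keyword:
    else
      let index := PySem.Str.findFrom cleaned keyword start none  -- cleaned.find(keyword, start)
      if index < 0 then []                                        -- if index < 0: break
      else index :: iterA_loop cleaned keyword (index + PySem.Str.len keyword) fuel
                                                                  -- yield index; start = index + len(keyword)

def iter_keyword_positions_py (cleaned : String) (keyword : String) : List Int :=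
  iterA_loop cleaned keyword 0 (cleaned.toList.length + 1)        -- start = 0

-- ===== PORT B =====
-- pass 2 of Source B: the for-loop over `candidates` with accumulator `last_end`
def greedyB (m : Int) : List Int → Int → List Int
  | [], _ => []
  | i :: rest, lastEnd =>
    if lastEnd ≤ i then i :: greedyB m rest (i + m)               -- if i >= last_end: yield i; last_end = i + m
    else greedyB m rest lastEnd

def iter_keyword_positions_py_alt (cleaned : String) (keyword : String) : List Int :=
  if keyword.toList = [] then []                                  -- if not keyword: return
  else
    let m : Int := PySem.Str.len keyword                          -- m = len(keyword)
    -- candidates = [i for i in range(len(cleaned) - m + 1) if cleaned[i:i+m] == keyword]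
    let candidates := (PySem.List.pyRange 0 (PySem.Str.len cleaned - m + 1) 1).filter
      (fun i => PySem.List.slice cleaned.toList (some i) (some (i + m)) == keyword.toList)
    greedyB m candidates 0

-- ===== PRECONDITION & SPEC =====
def Spec_iter_keyword_positions_py (cleaned : String) (keyword : String) (out : List Int) : Prop := out = iter_keyword_positions_py_alt cleaned keyword
instance (cleaned : String) (keyword : String) (out : List Int) : Decidable (Spec_iter_keyword_positions_py cleaned keyword out) := by unfold Spec_iter_keyword_positions_py; infer_instance

-- ===== CLAIM (what is proved, stated in full; the proofs are below) =====
def Claim_equal_iter_keyword_positions_py : Prop := ∀ (cleaned : String) (keyword : String), Dom_iter_keyword_positions_py cleaned keyword → Spec_iter_keyword_positions_py cleaned keyword (iter_keyword_positions_py cleaned keyword)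

-- ===== LEMMAS AND PROOFS =====

-- greedyB skips a leading block of elements below the threshold
theorem greedyB_drop (m : Int) (C1 C2 : List Int) (t : Int)
    (h : ∀ j ∈ C1, j < t) : greedyB m (C1 ++ C2) t = greedyB m C2 t := by
  induction C1 with
  | nil => rfl
  | cons a C1 ih =>
    rw [List.cons_append, greedyB, if_neg (by have := h a (by simp); omega)]
    exact ih (fun j hj => h j (by simp [hj]))

-- greedyB on a list whose prefix lies below the threshold and whose next element is above it
theorem greedyB_step (m : Int) (C1 C2 : List Int) (s r : Int)
    (h1 : ∀ j ∈ C1, j < s) (h2 : s ≤ r) :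
    greedyB m (C1 ++ r :: C2) s = r :: greedyB m C2 (r + m) := by
  rw [greedyB_drop m C1 _ s h1, greedyB, if_pos h2]

-- an occurrence at j ≥ s is an infix of the suffix from s
theorem infix_of_prefix_drop (kw cs : List Char) (s j : Nat) (hsj : s ≤ j)
    (h : kw <+: cs.drop j) : kw <:+: cs.drop s := by
  have hd : cs.drop j = (cs.drop s).drop (j - s) := by rw [List.drop_drop]; congr 1; omega
  rw [hd] at h
  exact h.isInfix.trans (List.drop_suffix _ _).isInfix

-- the slice test of Source B is the prefix-occurrence test (|kw| = m)
theorem slice_eq_iff (cs kw : List Char) (j : Nat) :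
    (PySem.List.slice cs (some (j : Int)) (some ((j : Int) + (kw.length : Int))) == kw) = true
      ↔ kw <+: cs.drop j := by
  rw [PySem.List.slice_natCast_add, beq_iff_eq]
  constructor
  · intro h
    have hlen : kw.length ≤ (cs.drop j).length := by
      by_contra hc
      rw [List.take_of_length_le (by omega)] at h
      subst h; omega
    exact h ▸ List.take_prefix _ _
  · intro h
    obtain ⟨t, ht⟩ := h
    rw [← ht, List.take_left']
    rfl

-- the candidate list of Source B, as a mapped-and-filtered Nat range
theorem candidates_eq (cs kw : List Char) :
    (PySem.List.pyRange 0 ((cs.length : Int) - (kw.length : Int) + 1) 1).filter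
        (fun i => PySem.List.slice cs (some i) (some (i + (kw.length : Int))) == kw)
      = ((List.range ((cs.length : Int) - (kw.length : Int) + 1).toNat).filter
          (fun j => decide (kw <+: cs.drop j))).map (fun (j : Nat) => (j : Int)) := by
  rw [PySem.List.pyRange_one, List.filter_map]
  simp only [Int.sub_zero, zero_add]
  congr 1
  apply List.filter_congr
  intro j _
  simp only [Function.comp]
  by_cases h : kw <+: cs.drop j
  · simp [h, (slice_eq_iff cs kw j).mpr h]
  · simp only [h, decide_false]
    by_contra hc
    simp only [Bool.not_eq_false] at hc
    exact h ((slice_eq_iff cs kw j).mp hc)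

theorem main_loop (cleaned keyword : String) (k : Char) (ks : List Char)
    (hkw : keyword.toList = k :: ks) :
    ∀ fuel i : Nat, i ≤ cleaned.toList.length → cleaned.toList.length + 1 - i ≤ fuel →
      iterA_loop cleaned keyword (i : Int) fuel
        = greedyB (keyword.toList.length : Int)
            (((List.range ((cleaned.toList.length : Int) - (keyword.toList.length : Int) + 1).toNat).filter
                (fun j => decide (keyword.toList <+: cleaned.toList.drop j))).map (fun (j : Nat) => (j : Int)))
            (i : Int) := by
  intro fuel
  induction fuel with
  | zero => intro i h1 h2; omega
  | succ f ih =>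
    intro i h1 h2
    have hne : ¬ keyword.toList = [] := by simp [hkw]
    simp only [iterA_loop, PySem.Str.findFrom_eq, if_neg hne]
    by_cases hneg : PySem.Chars.findFrom cleaned.toList keyword.toList (i : Int) = -1
    · rw [hneg, if_pos (by norm_num)]
      have hno : ¬ keyword.toList <:+: cleaned.toList.drop i :=
        (PySem.Chars.findFrom_natCast_eq_neg_one_iff cleaned.toList keyword.toList i h1).mp hneg
      rw [show (((List.range ((cleaned.toList.length : Int) - (keyword.toList.length : Int) + 1).toNat).filter
                (fun j => decide (keyword.toList <+: cleaned.toList.drop j))).map (fun (j : Nat) => (j : Int)))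
            = (((List.range ((cleaned.toList.length : Int) - (keyword.toList.length : Int) + 1).toNat).filter
                (fun j => decide (keyword.toList <+: cleaned.toList.drop j))).map (fun (j : Nat) => (j : Int))) ++ ([] : List Int)
            from (List.append_nil _).symm]
      rw [greedyB_drop]
      · rfl
      · intro j hj
        simp only [List.mem_map, List.mem_filter, List.mem_range, decide_eq_true_eq] at hj
        obtain ⟨j', ⟨_, hp⟩, rfl⟩ := hj
        by_contra hc
        have hij : i ≤ j' := by omega
        exact hno (infix_of_prefix_drop keyword.toList cleaned.toList i j' hij hp)
    · obtain ⟨hle, hmatch, hmin⟩ :=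
        PySem.Chars.findFrom_natCast_spec cleaned.toList keyword.toList i h1 hneg
      set r := PySem.Chars.findFrom cleaned.toList keyword.toList (i : Int) with hrdef
      set n := cleaned.toList.length with hn
      set m := keyword.toList.length with hm
      set N := ((n : Int) - (m : Int) + 1).toNat with hN
      have hr0 : (0 : Int) ≤ r := le_trans (by positivity) hle
      have hrm : r = (r.toNat : Int) := (Int.toNat_of_nonneg hr0).symm
      have him : i ≤ r.toNat := by omega
      have hm1 : 1 ≤ m := by rw [hm, hkw]; simp
      have hbound : r.toNat + m ≤ n := by
        have := hmatch.length_le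
        simp only [List.length_drop] at this
        omega
      have hrN : r.toNat < N := by omega
      rw [if_neg (by omega)]
      have hlen : PySem.Str.len keyword = (m : Int) := by
        simp [PySem.Str.len, hm]
      have hsplit : List.range N
          = List.range r.toNat ++ r.toNat :: ((List.range (N - (r.toNat + 1))).map (fun x => r.toNat + 1 + x)) := by
        have h : List.range (r.toNat + (N - r.toNat))
            = List.range r.toNat ++ (List.range (N - r.toNat)).map (fun x => r.toNat + x) :=
          List.range_add
        rw [show r.toNat + (N - r.toNat) = N by omega] at h
        rw [h, show N - r.toNat = (N - (r.toNat + 1)) + 1 by omega, List.range_succ_eq_map]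
        simp only [List.map_cons, List.map_map, Nat.add_zero]
        congr 1
        refine congrArg (List.cons r.toNat) (List.map_congr_left ?_)
        intro x _
        simp [Function.comp]
        omega
      have hC1lt : ∀ j ∈ ((List.range r.toNat).filter
            (fun j => decide (keyword.toList <+: cleaned.toList.drop j))).map (fun (j : Nat) => (j : Int)),
          j < (i : Int) := by
        intro j hj
        simp only [List.mem_map, List.mem_filter, List.mem_range, decide_eq_true_eq] at hj
        obtain ⟨j', ⟨hlt, hp⟩, rfl⟩ := hj
        have : ¬ (i ≤ j') := fun hij => hmin j' hij (by omega) hp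
        omega
      have hC1lt2 : ∀ j ∈ ((List.range r.toNat).filter
            (fun j => decide (keyword.toList <+: cleaned.toList.drop j))).map (fun (j : Nat) => (j : Int)),
          j < ((r.toNat + m : Nat) : Int) := by
        intro j hj
        simp only [List.mem_map, List.mem_filter, List.mem_range, decide_eq_true_eq] at hj
        obtain ⟨j', ⟨hlt, _⟩, rfl⟩ := hj
        push_cast
        omega
      rw [hrm]
      rw [hsplit, List.filter_append, List.filter_cons, if_pos (by simpa using hmatch),
        List.map_append, List.map_cons]
      rw [greedyB_step _ _ _ _ _ hC1lt (hrm ▸ hle)]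
      congr 1
      rw [hlen, show ((r.toNat : Int) + (m : Int)) = ((r.toNat + m : Nat) : Int) by push_cast; ring]
      rw [ih (r.toNat + m) (by omega) (by omega)]
      rw [hsplit, List.filter_append, List.filter_cons, if_pos (by simpa using hmatch),
        List.map_append, List.map_cons]
      rw [greedyB_drop _ _ _ _ hC1lt2, greedyB, if_neg (by push_cast; omega)]

-- ===== VERDICT (by name: the statement is the Claim_ definition above) =====
theorem iter_keyword_positions_py_spec : Claim_equal_iter_keyword_positions_py := by
  intro cleaned keyword _
  unfold Spec_iter_keyword_positions_py iter_keyword_positions_py iter_keyword_positions_py_alt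
  cases hkw : keyword.toList with
  | nil =>
    cases h : cleaned.toList.length + 1 with
    | zero => simp at h
    | succ n => simp [iterA_loop, hkw]
  | cons k ks =>
    rw [if_neg (by simp)]
    have hmain := main_loop cleaned keyword k ks hkw (cleaned.toList.length + 1) 0
      (Nat.zero_le _) (by omega)
    simp only [Nat.cast_zero] at hmain
    rw [hmain]
    simp only [PySem.Str.len]
    rw [← hkw]
    rw [candidates_eq cleaned.toList keyword.toList]
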